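-- pv_equiv track=rewrite | github.com/diesarrollador/Code-war--Code-logic | season-3/earned-money.py | shoe_shop
-- ===== SOURCE A (Python) =====
-- from collections import Counter
--
-- def shoe_shop(tallas: list, lista_clientes: list) -> int:
--     out = list()
--     tallas_dic = Counter(tallas)
--     for clie in lista_clientes:
--         if clie[0] in tallas_dic.keys():
--             if tallas_dic.get(clie[0]) > 0:
--                 out.append(clie[-1])
--                 tallas_dic[clie[0]] -= 1
--     return sum(out)
-- ===== SOURCE B (Python) =====
-- from collections import Counter
--
-- def shoe_shop(tallas: list, lista_clientes: list) -> int: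
--     cnt = Counter(tallas)
--     index = {}
--     for clie in lista_clientes:
--         index[clie[0]] = index.get(clie[0], []) + [clie[-1]]
--     return sum(sum(prices[:cnt.get(size, 0)]) for size, prices in index.items())
-- ===== Notes on version B (the rewrite author's own statement) =====
-- stated objective: alternative
-- what changed: Replaces the sequential pass that mutates a per-size counter with a group-by: clients are bucketed per size into an ordered index and the total is the sum, per size, of the first availability-many requested prices.
import Mathlib
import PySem

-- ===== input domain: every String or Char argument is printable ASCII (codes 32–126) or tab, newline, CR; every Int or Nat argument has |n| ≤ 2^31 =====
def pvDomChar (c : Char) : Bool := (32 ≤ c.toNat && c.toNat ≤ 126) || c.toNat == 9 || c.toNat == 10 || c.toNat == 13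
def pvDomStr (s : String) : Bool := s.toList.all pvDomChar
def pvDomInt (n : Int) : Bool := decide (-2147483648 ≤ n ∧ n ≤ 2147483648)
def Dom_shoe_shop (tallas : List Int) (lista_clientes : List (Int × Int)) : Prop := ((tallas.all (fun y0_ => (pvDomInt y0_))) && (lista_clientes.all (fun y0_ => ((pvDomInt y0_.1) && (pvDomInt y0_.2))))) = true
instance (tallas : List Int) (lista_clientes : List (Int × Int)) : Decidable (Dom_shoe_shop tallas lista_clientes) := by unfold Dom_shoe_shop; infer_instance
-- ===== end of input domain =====

-- B groups the clients per size and charges the first availability-many of each group,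
-- instead of A's sequential pass mutating a counter: an alternative decomposition, same cost.

-- ===== PORT A =====
def shoe_shop (tallas : List Int) (lista_clientes : List (Int × Int)) : Int :=
  -- out = list(); tallas_dic = Counter(tallas)
  let tallas_dic : PySem.Dict Int Int := PySem.Dict.counter tallas
  -- for clie in lista_clientes: …
  let res := lista_clientes.foldl
    (fun (st : List Int × PySem.Dict Int Int) clie =>
      if (st.2.keys).contains clie.1 then
        if ((st.2.get? clie.1).getD 0) > 0 then
          (st.1 ++ [clie.2], st.2.insert clie.1 ((st.2.get? clie.1).getD 0 - 1))
        else st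
      else st)
    ([], tallas_dic)
  res.1.sum

-- ===== PORT B =====
def shoe_shop_alt (tallas : List Int) (lista_clientes : List (Int × Int)) : Int :=
  let cnt : PySem.Dict Int Int := PySem.Dict.counter tallas
  -- index[clie[0]] = index.get(clie[0], []) + [clie[-1]]
  let index : PySem.Dict Int (List Int) :=
    lista_clientes.foldl (fun d clie => d.modify clie.1 [] (· ++ [clie.2])) PySem.Dict.empty
  -- sum(sum(prices[:cnt.get(size, 0)]) for size, prices in index.items())
  index.items.foldl
    (fun acc p => acc + (PySem.List.slice p.2 none (some (cnt.getD p.1 0))).sum) 0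

-- ===== PRECONDITION & SPEC =====
def Spec_shoe_shop (tallas : List Int) (lista_clientes : List (Int × Int)) (out : Int) : Prop := out = shoe_shop_alt tallas lista_clientes
instance (tallas : List Int) (lista_clientes : List (Int × Int)) (out : Int) : Decidable (Spec_shoe_shop tallas lista_clientes out) := by unfold Spec_shoe_shop; infer_instance

-- ===== CLAIM (what is proved, stated in full; the proofs are below) =====
def Claim_equal_shoe_shop : Prop := ∀ (tallas : List Int) (lista_clientes : List (Int × Int)), Dom_shoe_shop tallas lista_clientes → Spec_shoe_shop tallas lista_clientes (shoe_shop tallas lista_clientes)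

-- ===== LEMMAS AND PROOFS =====

-- prices requested for size s, in arrival order
def pricesOf (s : Int) (cs : List (Int × Int)) : List Int :=
  (cs.filter (fun p => p.1 == s)).map (·.2)

-- abstract sequential consumption (A's loop over an abstract counter)
def seqServe (c : Int → Nat) : List (Int × Int) → Int
  | [] => 0
  | q :: rest =>
    if c q.1 ≠ 0 then q.2 + seqServe (Function.update c q.1 (c q.1 - 1)) rest
    else seqServe c rest

lemma pricesOf_cons (s : Int) (q : Int × Int) (cs : List (Int × Int)) :
    pricesOf s (q :: cs) = if q.1 = s then q.2 :: pricesOf s cs else pricesOf s cs := by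
  simp only [pricesOf, List.filter_cons]
  by_cases h : q.1 = s <;> simp [h]

lemma pricesOf_of_not_mem (s : Int) (cs : List (Int × Int))
    (h : s ∉ cs.map Prod.fst) : pricesOf s cs = [] := by
  simp only [pricesOf, List.map_eq_nil_iff, List.filter_eq_nil_iff]
  intro p hp
  simp only [beq_iff_eq]
  intro he
  exact h (he ▸ List.mem_map_of_mem hp)

-- the central regrouping identity
lemma seqServe_eq_groupSum (cs : List (Int × Int)) : ∀ (c : Int → Nat),
    seqServe c cs =
      ∑ s ∈ (cs.map Prod.fst).toFinset, ((pricesOf s cs).take (c s)).sum := by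
  induction cs with
  | nil => intro c; simp [seqServe]
  | cons q rest ih =>
    intro c
    obtain ⟨s, p⟩ := q
    have hmap : ((s, p) :: rest).map Prod.fst = s :: rest.map Prod.fst := by simp
    set S := (rest.map Prod.fst).toFinset with hS
    have hsi : s ∈ insert s S := Finset.mem_insert_self s S
    have herase : (insert s S).erase s = S.erase s := Finset.erase_insert_eq_erase S s
    have hprices_ne : ∀ t ∈ S.erase s, pricesOf t ((s, p) :: rest) = pricesOf t rest := by
      intro t ht
      rw [pricesOf_cons]
      have : s ≠ t := fun h => (Finset.mem_erase.mp ht).1 h.symm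
      simp [this]
    have hprices_s : pricesOf s ((s, p) :: rest) = p :: pricesOf s rest := by
      rw [pricesOf_cons]; simp
    by_cases hc : c s = 0
    · -- no pair available for size s: the head client is skipped
      have hstep : seqServe c ((s, p) :: rest) = seqServe c rest := by
        simp [seqServe, hc]
      rw [hstep, ih c, hmap, List.toFinset_cons, ← hS]
      rw [← Finset.add_sum_erase _ _ hsi, herase, hprices_s, hc]
      simp only [List.take_zero, List.sum_nil, zero_add]
      have hcongr : ∑ t ∈ S.erase s, ((pricesOf t ((s, p) :: rest)).take (c t)).sum
          = ∑ t ∈ S.erase s, ((pricesOf t rest).take (c t)).sum := by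
        apply Finset.sum_congr rfl
        intro t ht; rw [hprices_ne t ht]
      rw [hcongr]
      by_cases hsS : s ∈ S
      · rw [← Finset.add_sum_erase _ _ hsS, hc]; simp
      · rw [Finset.erase_eq_of_notMem hsS]
    · -- a pair is available: the head client is served
      obtain ⟨k, hk⟩ : ∃ k, c s = k + 1 := ⟨c s - 1, by omega⟩
      have hstep : seqServe c ((s, p) :: rest)
          = p + seqServe (Function.update c s (c s - 1)) rest := by
        simp [seqServe, hc]
      set c' := Function.update c s (c s - 1) with hc'
      have hc's : c' s = k := by simp [hc', hk]
      have hc't : ∀ t, t ≠ s → c' t = c t := by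
        intro t ht; simp [hc', Function.update_of_ne ht]
      rw [hstep, ih c', hmap, List.toFinset_cons, ← hS]
      rw [← Finset.add_sum_erase _ _ hsi, herase, hprices_s, hk]
      simp only [List.take_succ_cons, List.sum_cons]
      have hcongr : ∑ t ∈ S.erase s, ((pricesOf t ((s, p) :: rest)).take (c t)).sum
          = ∑ t ∈ S.erase s, ((pricesOf t rest).take (c' t)).sum := by
        apply Finset.sum_congr rfl
        intro t ht
        rw [hprices_ne t ht, hc't t (Finset.mem_erase.mp ht).1]
      rw [hcongr]
      by_cases hsS : s ∈ S
      · rw [← Finset.add_sum_erase _ (fun t => ((pricesOf t rest).take (c' t)).sum) hsS, hc's]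
        ring
      · have hnil : pricesOf s rest = [] := by
          apply pricesOf_of_not_mem
          simpa [hS, List.mem_toFinset] using hsS
        rw [Finset.erase_eq_of_notMem hsS, hnil]
        simp

-- A's loop equals the abstract sequential consumption
lemma shoeA_loop (cs : List (Int × Int)) : ∀ (out : List Int) (d : PySem.Dict Int Int),
    (∀ k, 0 ≤ d.getD k 0) →
    (cs.foldl
      (fun (st : List Int × PySem.Dict Int Int) clie =>
        if (st.2.keys).contains clie.1 then
          if ((st.2.get? clie.1).getD 0) > 0 then
            (st.1 ++ [clie.2], st.2.insert clie.1 ((st.2.get? clie.1).getD 0 - 1))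
          else st
        else st)
      (out, d)).1.sum
    = out.sum + seqServe (fun s => (d.getD s 0).toNat) cs := by
  induction cs with
  | nil => intro out d _; simp [seqServe]
  | cons q rest ih =>
    intro out d hnn
    obtain ⟨s, p⟩ := q
    have hgetD : (d.get? s).getD 0 = d.getD s 0 := (PySem.Dict.getD_eq_get?_getD d s 0).symm
    by_cases hpos : d.getD s 0 > 0
    · -- key present with positive count
      have hcont : (d.keys).contains s = true := by
        have h1 : d.contains s = true := by
          by_contra h
          have hf : d.contains s = false := by
            revert h; cases d.contains s <;> simp
          have := PySem.Dict.getD_of_not_contains (d := d) (k := s) (d0 := 0) hf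
          omega
        have := (PySem.Dict.contains_iff_mem_keys (d := d) (k := s)).mp h1
        exact List.contains_iff_mem.mpr this
      have hstep : (List.foldl
          (fun (st : List Int × PySem.Dict Int Int) clie =>
            if (st.2.keys).contains clie.1 then
              if ((st.2.get? clie.1).getD 0) > 0 then
                (st.1 ++ [clie.2], st.2.insert clie.1 ((st.2.get? clie.1).getD 0 - 1))
              else st
            else st)
          (out, d) (((s, p)) :: rest)) =
          (List.foldl
            (fun (st : List Int × PySem.Dict Int Int) clie =>
              if (st.2.keys).contains clie.1 then
                if ((st.2.get? clie.1).getD 0) > 0 then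
                  (st.1 ++ [clie.2], st.2.insert clie.1 ((st.2.get? clie.1).getD 0 - 1))
                else st
              else st)
            (out ++ [p], d.insert s (d.getD s 0 - 1)) rest) := by
        simp only [List.foldl_cons, hcont, hgetD, if_true]
        rw [if_pos hpos]
      rw [hstep, ih]
      · have hfun : (fun t => ((d.insert s (d.getD s 0 - 1)).getD t 0).toNat)
            = Function.update (fun t => (d.getD t 0).toNat) s ((d.getD s 0).toNat - 1) := by
          funext t
          rw [PySem.Dict.getD_insert]
          by_cases ht : t = s
          · subst ht; simp [Function.update_self]
          · simp [ht]

        have hne : (fun t => (d.getD t 0).toNat) s ≠ 0 := by simp; omega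
        rw [hfun]
        have : seqServe (fun t => (d.getD t 0).toNat) ((s, p) :: rest)
            = p + seqServe (Function.update (fun t => (d.getD t 0).toNat) s
                ((fun t => (d.getD t 0).toNat) s - 1)) rest := by
          simp only [seqServe]
          rw [if_pos (show (d.getD s 0).toNat ≠ 0 by omega)]
        rw [this]
        simp only [List.sum_append, List.sum_cons, List.sum_nil, add_zero]
        ring
      · intro k
        rw [PySem.Dict.getD_insert]
        by_cases hk : k = s
        · simp [hk]; omega
        · simp [hk]; exact hnn k
    · -- skipped: either key absent, or present with count 0
      have hz : (fun t => (d.getD t 0).toNat) s = 0 := by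
        simp; omega
      have hseq : seqServe (fun t => (d.getD t 0).toNat) ((s, p) :: rest)
          = seqServe (fun t => (d.getD t 0).toNat) rest := by
        simp only [seqServe, hz]; simp
      have hstep : (List.foldl
          (fun (st : List Int × PySem.Dict Int Int) clie =>
            if (st.2.keys).contains clie.1 then
              if ((st.2.get? clie.1).getD 0) > 0 then
                (st.1 ++ [clie.2], st.2.insert clie.1 ((st.2.get? clie.1).getD 0 - 1))
              else st
            else st)
          (out, d) ((s, p) :: rest)) =
          (List.foldl
            (fun (st : List Int × PySem.Dict Int Int) clie =>
              if (st.2.keys).contains clie.1 then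
                if ((st.2.get? clie.1).getD 0) > 0 then
                  (st.1 ++ [clie.2], st.2.insert clie.1 ((st.2.get? clie.1).getD 0 - 1))
                else st
              else st)
            (out, d) rest) := by
        simp only [List.foldl_cons, hgetD]
        by_cases hcont : s ∈ d.keys
        · simp [hcont, hpos]
        · simp [hcont]

      rw [hstep, ih out d hnn, hseq]
  
-- B as a sum over the distinct sizes, of the first count-many grouped prices
lemma shoeB_eq (tallas : List Int) (cs : List (Int × Int)) :
    shoe_shop_alt tallas cs
      = ∑ s ∈ (cs.map Prod.fst).toFinset, ((pricesOf s cs).take (tallas.count s)).sum := by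
  unfold shoe_shop_alt
  show ((cs.foldl (fun d clie => d.modify clie.1 [] (· ++ [clie.2]))
      PySem.Dict.empty).items.foldl
      (fun acc p => acc +
        (PySem.List.slice p.2 none (some ((PySem.Dict.counter tallas).getD p.1 0))).sum) 0) = _
  set cnt := PySem.Dict.counter tallas with hcnt
  set index := cs.foldl (fun d clie => d.modify clie.1 [] (· ++ [clie.2])) PySem.Dict.empty
    with hindex
  have hkeys : index.keys = PySem.Set.ofList (cs.map Prod.fst) := by
    rw [hindex, PySem.Dict.keys_foldl_modify_key]
    rfl
  have hnodup : index.keys.Nodup := by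
    rw [hkeys]; exact PySem.Set.nodup_ofList _
  have hgetD : ∀ s, index.getD s [] = pricesOf s cs := by
    intro s
    rw [hindex, PySem.Dict.getD_foldl_modify_append]
    simp [pricesOf, PySem.Dict.getD_empty]
  have hitems : index.items = index.keys.map (fun k => (k, index.getD k [])) :=
    PySem.Dict.items_eq_map_keys index hnodup []
  rw [show (fun (acc : Int) (p : Int × List Int) =>
        acc + (PySem.List.slice p.2 none (some (cnt.getD p.1 0))).sum)
      = (fun acc p => acc + (fun q : Int × List Int =>
          (PySem.List.slice q.2 none (some (cnt.getD q.1 0))).sum) p) from rfl]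
  rw [PySem.List.foldl_add]
  rw [hitems, List.map_map, zero_add]
  have hterm : ∀ s, ((fun p : Int × List Int =>
        (PySem.List.slice p.2 none (some (cnt.getD p.1 0))).sum) ∘
        (fun k => (k, index.getD k []))) s
      = ((pricesOf s cs).take (tallas.count s)).sum := by
    intro s
    simp only [Function.comp_apply]
    rw [hgetD s, hcnt, PySem.Dict.getD_counter]
    rw [show ((tallas.count s : Int)) = ((tallas.count s : Nat) : Int) from rfl]
    rw [PySem.List.slice_to_natCast]
  rw [List.map_congr_left (fun s _ => hterm s)]
  rw [← List.sum_toFinset _ (hkeys ▸ PySem.Set.nodup_ofList (cs.map Prod.fst))]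
  apply Finset.sum_congr
  · ext t
    simp [hkeys, List.mem_toFinset, PySem.Set.mem_ofList]
  · intro _ _; rfl

-- ===== VERDICT (by name: the statement is the Claim_ definition above) =====
theorem shoe_shop_spec : Claim_equal_shoe_shop := by
  intro tallas cs _
  unfold Spec_shoe_shop
  rw [shoeB_eq]
  unfold shoe_shop
  rw [shoeA_loop cs [] (PySem.Dict.counter tallas)
    (fun k => by rw [PySem.Dict.getD_counter]; positivity)]
  have hfun : (fun s => ((PySem.Dict.counter tallas).getD s 0).toNat)
      = fun s => tallas.count s := by
    funext s; rw [PySem.Dict.getD_counter]; simp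
  rw [hfun, seqServe_eq_groupSum]
  simp
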